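-- pv_equiv track=rewrite | github.com/BrennoR/ctci-python | Sorting and Searching/10.11.py | pk_vl_convert
-- ===== SOURCE A (Python) =====
-- def pk_vl_convert(arr: [int]) -> [int]:
--     if arr is None:
--         return arr
--
--     arr.sort()
--     mid = len(arr) // 2
--     left = arr[:mid]
--     right = arr[mid:]
--
--     i, j, k = 0, len(right) - 1, 0
--     while i < len(left) and j >= 0:
--         arr[k] = right[j]
--         k += 1
--         j -= 1
--         arr[k] = left[i]
--         k += 1
--         i += 1
--
--     while i < len(left):
--         arr[k] = left[i]
--         i += 1
--         k += 1
--
--     while j >= 0: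
--         arr[k] = right[j]
--         j -= 1
--         k += 1
--
--     return arr
-- ===== SOURCE B (Python) =====
-- def pk_vl_convert(arr):
--     if arr is None:
--         return arr
--     arr.sort()
--     n = len(arr)
--     mid = n // 2
--     res = [0] * n
--     for s in range(n):
--         if s < mid:
--             res[2 * s + 1] = arr[s]
--         else:
--             res[2 * (n - 1 - s)] = arr[s]
--     arr[:] = res
--     return arr
-- ===== Notes on version B (the rewrite author's own statement) =====
-- stated objective: alternative
-- what changed: A splits the sorted list into two halves and interleaves them with a two-pointer loop plus two leftover loops; B makes one forward pass over the sorted list and scatters each element directly to its computed alternating position (2s+1 for the low half, 2(n-1-s) for the high half).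
import Mathlib
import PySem

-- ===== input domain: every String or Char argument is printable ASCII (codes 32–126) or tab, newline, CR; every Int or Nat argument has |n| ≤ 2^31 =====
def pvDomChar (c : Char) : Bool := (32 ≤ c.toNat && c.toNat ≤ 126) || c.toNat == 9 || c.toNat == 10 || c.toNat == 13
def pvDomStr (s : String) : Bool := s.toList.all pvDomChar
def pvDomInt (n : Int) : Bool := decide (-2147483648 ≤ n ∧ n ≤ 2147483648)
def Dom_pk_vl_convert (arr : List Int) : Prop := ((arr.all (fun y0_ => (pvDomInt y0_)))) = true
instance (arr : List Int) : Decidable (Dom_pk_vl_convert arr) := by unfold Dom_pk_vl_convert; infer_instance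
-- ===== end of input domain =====

-- B replaces A's two-pointer interleaving of the two sorted halves by a single scatter pass
-- over the sorted list; both Pythons sort/overwrite `arr` in place the same way, and the
-- theorems below are about the returned value.

-- ===== PORT A =====
-- first while loop: alternately write right (from the back) and left (from the front) at k, k+1, …
-- (pyGetD/pySetD with default are exact here: A's guards keep every index in range, so Python never raises)
def pkLoop1 (left right : List Int) (cur : List Int) (i j k : Int) :
    List Int × Int × Int × Int :=
  if h : i < (left.length : Int) ∧ 0 ≤ j then
    let cur1 := PySem.List.pySetD cur k (PySem.List.pyGetD right j 0)
    let cur2 := PySem.List.pySetD cur1 (k + 1) (PySem.List.pyGetD left i 0)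
    pkLoop1 left right cur2 (i + 1) (j - 1) (k + 2)
  else (cur, i, j, k)
termination_by ((left.length : Int) - i).toNat
decreasing_by omega

-- second while loop: copy the rest of left
def pkLoop2 (left : List Int) (cur : List Int) (i k : Int) : List Int × Int × Int :=
  if h : i < (left.length : Int) then
    pkLoop2 left (PySem.List.pySetD cur k (PySem.List.pyGetD left i 0)) (i + 1) (k + 1)
  else (cur, i, k)
termination_by ((left.length : Int) - i).toNat
decreasing_by omega

-- third while loop: copy the rest of right, from the back
def pkLoop3 (right : List Int) (cur : List Int) (j k : Int) : List Int × Int × Int :=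
  if h : 0 ≤ j then
    pkLoop3 right (PySem.List.pySetD cur k (PySem.List.pyGetD right j 0)) (j - 1) (k + 1)
  else (cur, j, k)
termination_by (j + 1).toNat
decreasing_by omega

def pk_vl_convert (arr : List Int) : List Int :=
  let a := PySem.List.sorted arr (fun x => x) false
  let mid := PySem.Int.floordiv (a.length : Int) 2
  let left := PySem.List.slice a none (some mid)
  let right := PySem.List.slice a (some mid) none
  match pkLoop1 left right a 0 ((right.length : Int) - 1) 0 with
  | (cur1, i1, j1, k1) =>
    match pkLoop2 left cur1 i1 k1 with
    | (cur2, _, k2) => (pkLoop3 right cur2 j1 k2).1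

-- ===== PORT B =====
def pk_vl_convert_alt (arr : List Int) : List Int :=
  let a := PySem.List.sorted arr (fun x => x) false
  let n : Int := a.length
  let mid := PySem.Int.floordiv n 2
  let res := List.replicate a.length (0 : Int)
  (PySem.List.pyRange 0 n 1).foldl
    (fun r s =>
      if s < mid then PySem.List.pySetD r (2 * s + 1) (PySem.List.pyGetD a s 0)
      else PySem.List.pySetD r (2 * (n - 1 - s)) (PySem.List.pyGetD a s 0))
    res

-- ===== PRECONDITION & SPEC =====
def Spec_pk_vl_convert (arr : List Int) (out : List Int) : Prop := out = pk_vl_convert_alt arr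
instance (arr : List Int) (out : List Int) : Decidable (Spec_pk_vl_convert arr out) := by unfold Spec_pk_vl_convert; infer_instance

-- ===== CLAIM (what is proved, stated in full; the proofs are below) =====
def Claim_equal_pk_vl_convert : Prop := ∀ (arr : List Int), Dom_pk_vl_convert arr → Spec_pk_vl_convert arr (pk_vl_convert arr)

-- ===== LEMMAS AND PROOFS =====

-- the block loop1 writes: right[j], l[0], right[j-1], l[1], …
def pkChunk (right : List Int) : List Int → Int → List Int
  | [], _ => []
  | x :: l', j => PySem.List.pyGetD right j 0 :: x :: pkChunk right l' (j - 1)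

theorem pkChunk_length (right l : List Int) (j : Int) :
    (pkChunk right l j).length = 2 * l.length := by
  induction l generalizing j with
  | nil => simp [pkChunk]
  | cons x l' ih => simp [pkChunk, ih]; omega

theorem pkChunk_getElem? (right : List Int) (l : List Int) (j : Int) (t : Nat)
    (ht : t < 2 * l.length) :
    (pkChunk right l j)[t]? =
      some (if t % 2 = 0 then PySem.List.pyGetD right (j - (t / 2 : Nat)) 0
            else l.getD (t / 2) 0) := by
  induction l generalizing j t with
  | nil => simp at ht
  | cons x l' ih =>
    match t with
    | 0 => simp [pkChunk]
    | 1 => simp [pkChunk]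
    | (n+2) =>
      have hn : n < 2 * l'.length := by simp at ht; omega
      have := ih (j - 1) n hn
      simp only [pkChunk, List.getElem?_cons_succ, this]
      have h2 : (n+2) % 2 = n % 2 := by omega
      have h3 : (n+2) / 2 = n / 2 + 1 := by omega
      rw [h2, h3]
      by_cases hp : n % 2 = 0
      · simp [hp]; congr 1; ring
      · simp [hp, List.getD]

theorem pkLoop1_spec_aux (left right : List Int) (m : Nat) :
    ∀ (i j k : Int) (cur : List Int),
    m = (((left.length : Int)) - i).toNat → 0 ≤ i → i ≤ (left.length : Int) → 0 ≤ k →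
    k + 2 * ((left.length : Int) - i) ≤ cur.length →
    (left.length : Int) - i ≤ j + 1 →
    pkLoop1 left right cur i j k =
      (cur.take k.toNat ++ pkChunk right (left.drop i.toNat) j
         ++ cur.drop (k.toNat + 2 * (left.length - i.toNat)),
       (left.length : Int), j - ((left.length : Int) - i),
       k + 2 * ((left.length : Int) - i)) := by
  induction m with
  | zero =>
    intro i j k cur hm hi hil hk hlen hj
    rw [pkLoop1, dif_neg (by omega)]
    have hd : left.drop i.toNat = [] := List.drop_eq_nil_of_le (by omega)
    rw [hd]
    simp only [pkChunk, Prod.mk.injEq]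
    refine ⟨?_, by omega, by omega, by omega⟩
    rw [show k.toNat + 2 * (left.length - i.toNat) = k.toNat by omega]
    simp
  | succ m ih =>
    intro i j k cur hm hi hil hk hlen hj
    have hcond : i < (left.length : Int) := by omega
    have hjge : 0 ≤ j := by omega
    rw [pkLoop1, dif_pos ⟨hcond, hjge⟩]
    dsimp only
    set rv := PySem.List.pyGetD right j 0 with hrv
    set lv := PySem.List.pyGetD left i 0 with hlv
    have hset : PySem.List.pySetD (PySem.List.pySetD cur k rv) (k + 1) lv
        = cur.take k.toNat ++ rv :: lv :: cur.drop (k.toNat + 2) := by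
      rw [PySem.List.pySetD_of_nonneg cur rv hk,
          PySem.List.pySetD_of_nonneg _ lv (by omega),
          show (k+1).toNat = k.toNat + 1 by omega]
      rw [List.set_eq_take_cons_drop rv (by omega)]
      rw [List.set_append]
      simp [List.length_take]
      rw [show min k.toNat cur.length = k.toNat by omega]
      rw [show k.toNat + 1 - k.toNat = 1 by omega]
      rw [List.drop_eq_getElem_cons (by omega : k.toNat + 1 < cur.length)]
      simp [List.set]
    rw [hset]
    have hElen : (cur.take k.toNat ++ rv :: lv :: cur.drop (k.toNat + 2)).length = cur.length := by
      simp [List.length_take, List.length_drop]; omega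
    rw [ih (i+1) (j-1) (k+2) _ (by omega) (by omega) (by omega) (by omega)
        (by rw [hElen]; omega) (by omega)]
    have htk : (k+2).toNat = k.toNat + 2 := by omega
    have hti : (i+1).toNat = i.toNat + 1 := by omega
    have hlt : i.toNat < left.length := by omega
    have hsplit : cur.take k.toNat ++ rv :: lv :: cur.drop (k.toNat + 2)
        = (cur.take k.toNat ++ [rv, lv]) ++ cur.drop (k.toNat + 2) := by simp
    have hchunk : pkChunk right (left.drop i.toNat) j
        = rv :: lv :: pkChunk right (left.drop (i.toNat + 1)) (j - 1) := by
      rw [List.drop_eq_getElem_cons hlt, pkChunk]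
      rw [hlv, PySem.List.pyGetD_eq_getElem left 0 hi (by omega)]
    have hlen_take : (cur.take k.toNat ++ [rv, lv]).length = k.toNat + 2 := by
      simp [List.length_take]; omega
    refine Prod.ext ?_ (by
      simp only [Prod.mk.injEq, true_and]; exact ⟨by omega, by omega⟩)
    simp only []
    rw [htk, hti, hchunk, hsplit]
    rw [show k.toNat + 2 = (cur.take k.toNat ++ [rv, lv]).length from hlen_take.symm]
    rw [List.take_left]
    rw [List.drop_length_add_append]
    rw [List.drop_drop]
    rw [hlen_take]
    rw [show k.toNat + 2 + 2 * (left.length - (i.toNat + 1))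
          = k.toNat + 2 * (left.length - i.toNat) by omega]
    simp [List.append_assoc]

-- A in closed form: the interleaved block, the untouched tail, and (n odd) one extra write of right[0]
theorem pvA_explicit (arr : List Int) :
    pk_vl_convert arr =
      (let a := PySem.List.sorted arr (fun x => x) false
       let m := a.length / 2
       let base := pkChunk (a.drop m) (a.take m) ((a.length : Int) - (m : Int) - 1)
         ++ a.drop (2 * m)
       if a.length % 2 = 1 then base.set (2 * m) (PySem.List.pyGetD (a.drop m) 0 0) else base) := by
  simp only [pk_vl_convert]
  set a := PySem.List.sorted arr (fun x => x) false with ha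
  have hmidI : PySem.Int.floordiv ((a.length : Nat) : Int) 2 = ((a.length / 2 : Nat) : Int) :=
    PySem.Int.floordiv_natCast a.length 2
  rw [hmidI, PySem.List.slice_to_natCast, PySem.List.slice_from_natCast]
  set m := a.length / 2 with hm
  have hmle : m ≤ a.length := by omega
  have hll : (a.take m).length = m := by simp [List.length_take]; omega
  have hrl : (a.drop m).length = a.length - m := by simp
  rw [pkLoop1_spec_aux (a.take m) (a.drop m) (a.take m).length 0
        (((a.drop m).length : Int) - 1) 0 a
        (by omega) (by omega) (by omega) (by omega)
        (by rw [hll]; omega)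
        (by rw [hll, hrl]; omega)]
  dsimp only
  rw [pkLoop2, dif_neg (by omega)]
  dsimp only
  have e0 : ((0:Int)).toNat = 0 := rfl
  simp only [e0, List.take_zero, List.drop_zero, List.nil_append, Nat.zero_add,
    Nat.sub_zero, hll, hrl]
  have hc : ((a.length - m : Nat) : Int) - 1 = (a.length : Int) - (m:Int) - 1 := by omega
  rw [hc]
  by_cases hpar : a.length % 2 = 1
  · have hj0 : ((a.length : Int) - (m:Int) - 1) - (((m:Nat):Int) - 0) = 0 := by omega
    rw [hj0, pkLoop3, dif_pos (le_refl (0:Int)), pkLoop3, dif_neg (by omega)]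
    dsimp only
    rw [if_pos hpar]
    rw [PySem.List.pySetD_of_nonneg _ _ (by omega)]
    have hix : ((0:Int) + 2 * (((m:Nat):Int) - 0)).toNat = 2 * m := by omega
    rw [hix]
  · have hj0 : ((a.length : Int) - (m:Int) - 1) - (((m:Nat):Int) - 0) = -1 := by omega
    rw [hj0, pkLoop3, dif_neg (by omega)]
    rw [if_neg hpar]

-- B-side scatter machinery
def pvG (nn mm : Int) (s : Int) : Int := if s < mm then 2 * s + 1 else 2 * (nn - 1 - s)

theorem pvFoldLength (g v : Int → Int) (L : List Int) :
    ∀ (res : List Int),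
    (L.foldl (fun r u => PySem.List.pySetD r (g u) (v u)) res).length = res.length := by
  induction L with
  | nil => intro res; rfl
  | cons x L ih =>
    intro res
    simp only [List.foldl_cons]
    rw [ih, PySem.List.length_pySetD]

theorem pvScatterUntouched (g v : Int → Int) (L : List Int) :
    ∀ (res : List Int) (t : Nat),
    (∀ s' ∈ L, 0 ≤ g s') → (∀ s' ∈ L, g s' ≠ (t : Int)) →
    (L.foldl (fun r u => PySem.List.pySetD r (g u) (v u)) res)[t]? = res[t]? := by
  induction L with
  | nil => intro res t _ _; rfl
  | cons x L ih =>
    intro res t h0 hne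
    simp only [List.foldl_cons]
    rw [ih _ t (fun s' hs' => h0 s' (List.mem_cons_of_mem x hs'))
          (fun s' hs' => hne s' (List.mem_cons_of_mem x hs'))]
    rw [PySem.List.pySetD_of_nonneg res (v x) (h0 x List.mem_cons_self)]
    exact List.getElem?_set_ne (by
      have h1 := h0 x List.mem_cons_self
      have h2 := hne x List.mem_cons_self
      omega)

theorem pvScatterGet (g v : Int → Int) (L : List Int) :
    ∀ (res : List Int) (s : Int),
    s ∈ L → (∀ s' ∈ L, 0 ≤ g s' ∧ g s' < res.length) →
    (∀ s' ∈ L, g s' = g s → s' = s) →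
    (L.foldl (fun r u => PySem.List.pySetD r (g u) (v u)) res)[(g s).toNat]? = some (v s) := by
  induction L with
  | nil => intro res s hs; exact absurd hs (List.not_mem_nil)
  | cons x L ih =>
    intro res s hs hrange hinj
    simp only [List.foldl_cons]
    by_cases hmem : s ∈ L
    · refine ih _ s hmem (fun s' hs' => ?_) (fun s' hs' => hinj s' (List.mem_cons_of_mem x hs'))
      rw [PySem.List.length_pySetD]
      exact hrange s' (List.mem_cons_of_mem x hs')
    · have hxs : x = s := by
        rcases List.mem_cons.mp hs with h | h
        · exact h.symm
        · exact absurd h hmem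
      subst hxs
      have hx0 := (hrange x List.mem_cons_self).1
      have hx1 := (hrange x List.mem_cons_self).2
      rw [pvScatterUntouched g v L _ _
            (fun s' hs' => (hrange s' (List.mem_cons_of_mem x hs')).1)
            (fun s' hs' heq => by
              have : s' = x := hinj s' (List.mem_cons_of_mem x hs') (by omega)
              exact hmem (this ▸ hs'))]
      rw [PySem.List.pySetD_of_nonneg res (v x) hx0]
      exact List.getElem?_set_self (by omega)

-- element t of the interleaved block, as an element of the sorted list
theorem pvBase_getElem (a : List Int) (t : Nat) (ht : t < 2 * (a.length / 2)) :
    ((pkChunk (a.drop (a.length / 2)) (a.take (a.length / 2))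
        ((a.length : Int) - ((a.length / 2 : Nat) : Int) - 1)
      ++ a.drop (2 * (a.length / 2)))[t]?) =
    some (if t % 2 = 0 then a.getD (a.length - 1 - t / 2) 0 else a.getD (t / 2) 0) := by
  set m := a.length / 2 with hm
  have h2a : 2 * m ≤ a.length := by omega
  have hll : (a.take m).length = m := by simp [List.length_take]; omega
  rw [List.getElem?_append_left (by rw [pkChunk_length, hll]; omega)]
  rw [pkChunk_getElem? _ _ _ t (by rw [hll]; omega)]
  congr 1
  by_cases hp : t % 2 = 0
  · simp only [if_pos hp]
    have hix : ((a.length : Int) - ((m : Nat) : Int) - 1) - ((t / 2 : Nat) : Int)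
        = ((a.length - m - 1 - t / 2 : Nat) : Int) := by omega
    rw [hix, PySem.List.pyGetD_natCast]
    rw [List.getD_eq_getElem?_getD, List.getElem?_drop, List.getD_eq_getElem?_getD]
    rw [show m + (a.length - m - 1 - t / 2) = a.length - 1 - t / 2 by omega]
  · simp only [if_neg hp]
    rw [List.getD_eq_getElem?_getD, List.getElem?_take, if_pos (by omega : t / 2 < m),
        List.getD_eq_getElem?_getD]

-- element t of B's scatter result
theorem pvB_getElem (a : List Int) (t : Nat) (ht : t < a.length) :
    ((PySem.List.pyRange 0 ((a.length : Nat) : Int) 1).foldl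
        (fun r s => PySem.List.pySetD r (pvG ((a.length : Nat) : Int) ((a.length / 2 : Nat) : Int) s)
          (PySem.List.pyGetD a s 0))
        (List.replicate a.length (0 : Int)))[t]? =
    some (if t % 2 = 0 then a.getD (a.length - 1 - t / 2) 0 else a.getD (t / 2) 0) := by
  set m := a.length / 2 with hm
  have h2a : 2 * m ≤ a.length := by omega
  have h2b : a.length ≤ 2 * m + 1 := by omega
  set sInt : Int := if t % 2 = 0 then ((a.length - 1 - t / 2 : Nat) : Int) else ((t / 2 : Nat) : Int)
    with hs
  have hsb : 0 ≤ sInt ∧ sInt < (a.length : Int) := by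
    by_cases hp : t % 2 = 0 <;> simp only [hs, hp, if_pos, ite_false] <;>
      constructor <;> omega
  have hg : pvG ((a.length : Nat) : Int) ((m : Nat) : Int) sInt = (t : Int) := by
    by_cases hp : t % 2 = 0
    · have hsv : sInt = ((a.length - 1 - t / 2 : Nat) : Int) := by simp [hs, hp]
      rw [hsv, pvG, if_neg (by omega)]; omega
    · have hsv : sInt = ((t / 2 : Nat) : Int) := by simp [hs, hp]
      rw [hsv, pvG, if_pos (by omega)]; omega
  have hrange : ∀ s' ∈ PySem.List.pyRange 0 ((a.length : Nat) : Int) 1,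
      0 ≤ pvG ((a.length : Nat) : Int) ((m : Nat) : Int) s' ∧
      pvG ((a.length : Nat) : Int) ((m : Nat) : Int) s' < (List.replicate a.length (0 : Int)).length := by
    intro s' hs'
    have hb := PySem.List.mem_pyRange_one.mp hs'
    rw [List.length_replicate, pvG]
    by_cases hlt : s' < ((m : Nat) : Int)
    · rw [if_pos hlt]; constructor <;> omega
    · rw [if_neg hlt]; constructor <;> omega
  have hinj : ∀ s' ∈ PySem.List.pyRange 0 ((a.length : Nat) : Int) 1,
      pvG ((a.length : Nat) : Int) ((m : Nat) : Int) s'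
        = pvG ((a.length : Nat) : Int) ((m : Nat) : Int) sInt → s' = sInt := by
    intro s' hs' heq
    have hb := PySem.List.mem_pyRange_one.mp hs'
    rw [pvG, pvG] at heq
    by_cases h1 : s' < ((m : Nat) : Int) <;> by_cases h2 : sInt < ((m : Nat) : Int) <;>
      simp only [h1, h2, if_pos, ite_false] at heq <;> omega
  have hmem : sInt ∈ PySem.List.pyRange 0 ((a.length : Nat) : Int) 1 :=
    PySem.List.mem_pyRange_one.mpr ⟨hsb.1, hsb.2⟩
  have := pvScatterGet (pvG ((a.length : Nat) : Int) ((m : Nat) : Int))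
    (fun s => PySem.List.pyGetD a s 0) (PySem.List.pyRange 0 ((a.length : Nat) : Int) 1)
    (List.replicate a.length (0 : Int)) sInt hmem hrange hinj
  rw [hg] at this
  rw [show ((t : Int)).toNat = t by omega] at this
  rw [this]
  by_cases hp : t % 2 = 0
  · have hsv : sInt = ((a.length - 1 - t / 2 : Nat) : Int) := by simp [hs, hp]
    rw [if_pos hp, hsv]
    simp only [PySem.List.pyGetD_natCast]
  · have hsv : sInt = ((t / 2 : Nat) : Int) := by simp [hs, hp]
    rw [if_neg hp, hsv]
    simp only [PySem.List.pyGetD_natCast]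

theorem pk_vl_eq (arr : List Int) : pk_vl_convert arr = pk_vl_convert_alt arr := by
  rw [pvA_explicit]
  simp only [pk_vl_convert_alt]
  set a := PySem.List.sorted arr (fun x => x) false with ha
  set m := a.length / 2 with hm
  have hmidI : PySem.Int.floordiv ((a.length : Nat) : Int) 2 = ((m : Nat) : Int) :=
    PySem.Int.floordiv_natCast a.length 2
  rw [hmidI]
  have hbody : (fun (r : List Int) (s : Int) =>
      if s < ((m : Nat) : Int) then PySem.List.pySetD r (2 * s + 1) (PySem.List.pyGetD a s 0)
      else PySem.List.pySetD r (2 * (((a.length : Nat) : Int) - 1 - s)) (PySem.List.pyGetD a s 0))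
      = fun r s => PySem.List.pySetD r (pvG ((a.length : Nat) : Int) ((m : Nat) : Int) s)
          (PySem.List.pyGetD a s 0) := by
    funext r s
    by_cases h : s < ((m : Nat) : Int) <;> simp [pvG, h]
  rw [hbody]
  have h2a : 2 * m ≤ a.length := by omega
  have h2b : a.length ≤ 2 * m + 1 := by omega
  have hbaseLen : (pkChunk (a.drop m) (a.take m) ((a.length : Int) - ((m : Nat) : Int) - 1)
      ++ a.drop (2 * m)).length = a.length := by
    rw [List.length_append, pkChunk_length]
    simp [List.length_take, List.length_drop]
    omega
  apply List.ext_getElem?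
  intro t
  by_cases ht : t < a.length
  · rw [pvB_getElem a t ht]
    by_cases hpar : a.length % 2 = 1
    · rw [if_pos hpar]
      by_cases hteq : t = 2 * m
      · rw [hteq, List.getElem?_set_self (by rw [hbaseLen]; omega)]
        rw [if_pos (by omega : (2 * m) % 2 = 0)]
        rw [PySem.List.pyGetD_zero, List.getD_eq_getElem?_getD, List.getElem?_drop,
            List.getD_eq_getElem?_getD]
        rw [show m + 0 = a.length - 1 - 2 * m / 2 by omega]
      · rw [List.getElem?_set_ne (by omega)]
        rw [pvBase_getElem a t (by omega)]
    · rw [if_neg hpar]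
      rw [pvBase_getElem a t (by omega)]
  · rw [List.getElem?_eq_none (by
        by_cases hpar : a.length % 2 = 1
        · rw [if_pos hpar, List.length_set, hbaseLen]; omega
        · rw [if_neg hpar, hbaseLen]; omega)]
    rw [List.getElem?_eq_none (by rw [pvFoldLength, List.length_replicate]; omega)]

-- ===== VERDICT (by name: the statement is the Claim_ definition above) =====
theorem pk_vl_convert_spec : Claim_equal_pk_vl_convert := by
  intro arr _
  unfold Spec_pk_vl_convert
  exact pk_vl_eq arr
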